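-- pv_equiv track=rewrite | github.com/masterpol/python-exercises | domain-hits.py | getSubDomainsRecursively
-- ===== SOURCE A (Python) =====
-- Result = dict[str, int]
--
-- def getSubDomainsRecursively(input: list[str], acc: Result, ref: Result) -> Result:
--     domainName = '.'.join(input)
--     result = acc.copy()
--     domain = result.get(domainName)
--
--     if(len(input) == 0):
--         return result
--
--     if(domain is None):
--         domain = 0
--         for k, v in ref.items():
--             if (domainName in k):
--                 domain = domain + v
--
--         result[domainName] = domain
--         input.pop(0)
--         return getSubDomainsRecursively(input, result, ref)
--
--     return result
-- ===== SOURCE B (Python) =====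
-- # Iterative re-implementation: one result dict, a for-loop over the suffix join
-- # names with break. Return-value equivalent to A only: A pops the processed
-- # elements off `input`; B does not mutate `input`.
-- def getSubDomainsRecursively(input, acc, ref):
--     result = dict(acc)
--     for i in range(len(input)):
--         name = '.'.join(input[i:])
--         if name in result:
--             break
--         result[name] = sum(v for k, v in ref.items() if name in k)
--     return result
-- ===== Notes on version B (the rewrite author's own statement) =====
-- stated objective: simpler
-- what changed: Replaced the tail recursion with per-level dict copies by a single for-loop over the suffix join-names that fills one result dict (one copy total) and breaks on the first already-present name; B does not mutate the input list (A pops its elements).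
import Mathlib
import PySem

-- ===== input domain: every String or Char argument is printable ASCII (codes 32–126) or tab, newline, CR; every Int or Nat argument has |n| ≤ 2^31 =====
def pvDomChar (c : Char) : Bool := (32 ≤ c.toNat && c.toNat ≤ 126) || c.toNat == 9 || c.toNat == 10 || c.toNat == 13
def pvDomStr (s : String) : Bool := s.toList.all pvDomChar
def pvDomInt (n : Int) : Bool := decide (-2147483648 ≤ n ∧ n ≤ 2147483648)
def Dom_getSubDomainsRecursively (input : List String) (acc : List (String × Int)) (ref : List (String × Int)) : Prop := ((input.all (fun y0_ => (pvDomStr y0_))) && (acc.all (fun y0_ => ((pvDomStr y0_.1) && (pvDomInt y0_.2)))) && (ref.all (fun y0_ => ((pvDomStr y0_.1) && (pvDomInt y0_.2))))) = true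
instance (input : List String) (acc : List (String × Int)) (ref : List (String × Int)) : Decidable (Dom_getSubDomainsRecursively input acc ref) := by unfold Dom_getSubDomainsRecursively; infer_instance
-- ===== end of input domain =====

-- B replaces A's tail recursion (a dict copy per level) by one for-loop over the
-- suffix join-names filling a single result dict; return values only — A pops the
-- processed elements off `input`, B does not mutate it.

-- ===== PORT A =====
def getSubDomainsRecursively (input : List String) (acc : List (String × Int)) (ref : List (String × Int)) : List (String × Int) :=
  let domainName := PySem.Str.join "." input
  let result := PySem.Dict.mk acc
  let domain := result.get? domainName
  if _h : input.length = 0 then result.items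
  else
    match domain with
    | none =>
      let d := ref.foldl (fun d kv => if PySem.Str.isIn domainName kv.1 then d + kv.2 else d) 0
      let result := result.insert domainName d
      -- input.pop(0): the recursive call sees the mutated list input.tail
      getSubDomainsRecursively input.tail result.items ref
    | some _ => result.items
termination_by input.length
decreasing_by simp [List.length_tail]; omega

-- ===== PORT B =====
def gsdrSum (name : String) (ref : List (String × Int)) : Int :=
  (ref.filterMap (fun kv => if PySem.Str.isIn name kv.1 then some kv.2 else none)).sum

def gsdrLoop (ref : List (String × Int)) (result : PySem.Dict String Int) : List String → PySem.Dict String Int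
  | [] => result
  | name :: rest =>
    if result.contains name then result
    else gsdrLoop ref (result.insert name (gsdrSum name ref)) rest

def getSubDomainsRecursively_alt (input : List String) (acc : List (String × Int)) (ref : List (String × Int)) : List (String × Int) :=
  (gsdrLoop ref (PySem.Dict.mk acc)
    ((List.range input.length).map (fun i => PySem.Str.join "." (List.drop i input)))).items

-- ===== PRECONDITION & SPEC =====
def Spec_getSubDomainsRecursively (input : List String) (acc : List (String × Int)) (ref : List (String × Int)) (out : List (String × Int)) : Prop := out = getSubDomainsRecursively_alt input acc ref
instance (input : List String) (acc : List (String × Int)) (ref : List (String × Int)) (out : List (String × Int)) : Decidable (Spec_getSubDomainsRecursively input acc ref out) := by unfold Spec_getSubDomainsRecursively; infer_instance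

-- ===== CLAIM (what is proved, stated in full; the proofs are below) =====
def Claim_equal_getSubDomainsRecursively : Prop := ∀ (input : List String) (acc : List (String × Int)) (ref : List (String × Int)), Dom_getSubDomainsRecursively input acc ref → Spec_getSubDomainsRecursively input acc ref (getSubDomainsRecursively input acc ref)

-- ===== LEMMAS AND PROOFS =====

-- A's accumulating sum over ref equals B's sum of the filtered values.
theorem gsdrSum_eq (name : String) (ref : List (String × Int)) (s : Int) :
    ref.foldl (fun d kv => if PySem.Str.isIn name kv.1 then d + kv.2 else d) s
      = s + gsdrSum name ref := by
  induction ref generalizing s with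
  | nil => simp [gsdrSum]
  | cons kv rest ih =>
      rw [List.foldl_cons]
      by_cases hc : PySem.Str.isIn name kv.1 = true
      · rw [if_pos hc, ih]
        simp only [gsdrSum, List.filterMap_cons, hc, List.sum_cons, if_true]
        ring
      · rw [if_neg hc, ih]
        simp only [gsdrSum, List.filterMap_cons, if_neg hc]

-- The list of suffix join-names unfolds one step at a time.
theorem gsdr_names_cons (x : String) (rest : List String) :
    (List.range (x :: rest).length).map (fun i => PySem.Str.join "." (List.drop i (x :: rest)))
      = PySem.Str.join "." (x :: rest)
        :: (List.range rest.length).map (fun i => PySem.Str.join "." (List.drop i rest)) := by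
  simp [List.range_succ_eq_map, List.map_map, Function.comp]

-- Core invariant: A on a dict's items equals B's loop over the suffix names.
theorem gsdr_main (input : List String) (ref : List (String × Int))
    (d : PySem.Dict String Int) :
    getSubDomainsRecursively input d.items ref
      = (gsdrLoop ref d
          ((List.range input.length).map (fun i => PySem.Str.join "." (List.drop i input)))).items := by
  induction input generalizing d with
  | nil =>
      rw [getSubDomainsRecursively.eq_def]
      simp [gsdrLoop]
  | cons x rest ih =>
      rw [gsdr_names_cons]
      rw [getSubDomainsRecursively.eq_def]
      simp only [List.length_cons, List.tail_cons]
      rw [dif_neg (by omega)]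
      rw [gsdrLoop]
      rw [PySem.Dict.contains_eq_isSome_get?]
      cases h : (PySem.Dict.mk d.items).get? (PySem.Str.join "." (x :: rest)) with
      | some v => simp
      | none =>
          simp only [Option.isSome_none, Bool.false_eq_true, if_false]
          rw [gsdrSum_eq]
          simp only [zero_add]
          exact ih _

-- ===== VERDICT (by name: the statement is the Claim_ definition above) =====
theorem getSubDomainsRecursively_spec : Claim_equal_getSubDomainsRecursively := by
  intro input acc ref _
  show _ = _
  unfold getSubDomainsRecursively_alt
  exact gsdr_main input ref (PySem.Dict.mk acc)
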